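-- pv_equiv track=rewrite | github.com/KirilStrezikozin/BakeMaster-Blender-Addon | utils.py | BM_Table_of_Objects_NameMatching_IndexesIntersaction
-- ===== SOURCE A (Python) =====
-- def BM_Table_of_Objects_NameMatching_IndexesIntersaction(indexes: list):
--     # removing empty shells
--     indexes = [shell for shell in indexes if len(shell) != 0]
--     intersaction = []
--     # loop through every number
--     for shell in indexes:
--         for number in shell:
--             # count how many times this number is present
--             number_presents = len(
--                 [shell1 for shell1 in indexes if number in shell1])
--             # if that count = len of all shells -> presented in all shells
--             if number_presents == len(indexes):
--                 intersaction.append(number)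
--     # remove duplicates and return
--     return list(dict.fromkeys(intersaction))
-- ===== SOURCE B (Python) =====
-- def BM_Table_of_Objects_NameMatching_IndexesIntersaction(indexes: list):
--     # drop empty shells
--     shells = [shell for shell in indexes if shell]
--     n = len(shells)
--     # one pass: count, per number, how many shells contain it
--     count = {}
--     for shell in shells:
--         for number in set(shell):
--             count[number] = count.get(number, 0) + 1
--     # numbers in traversal order, first occurrences only, kept iff in every shell
--     flat = [number for shell in shells for number in shell]
--     return [number for number in dict.fromkeys(flat) if count.get(number, 0) == n]
-- ===== Notes on version B (the rewrite author's own statement) =====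
-- stated objective: faster
-- what changed: Replaces the per-number rescan of all shells by a single counting pass (dict of shell-membership counts built once), then one ordered dedup-and-filter pass.
import Mathlib
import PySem

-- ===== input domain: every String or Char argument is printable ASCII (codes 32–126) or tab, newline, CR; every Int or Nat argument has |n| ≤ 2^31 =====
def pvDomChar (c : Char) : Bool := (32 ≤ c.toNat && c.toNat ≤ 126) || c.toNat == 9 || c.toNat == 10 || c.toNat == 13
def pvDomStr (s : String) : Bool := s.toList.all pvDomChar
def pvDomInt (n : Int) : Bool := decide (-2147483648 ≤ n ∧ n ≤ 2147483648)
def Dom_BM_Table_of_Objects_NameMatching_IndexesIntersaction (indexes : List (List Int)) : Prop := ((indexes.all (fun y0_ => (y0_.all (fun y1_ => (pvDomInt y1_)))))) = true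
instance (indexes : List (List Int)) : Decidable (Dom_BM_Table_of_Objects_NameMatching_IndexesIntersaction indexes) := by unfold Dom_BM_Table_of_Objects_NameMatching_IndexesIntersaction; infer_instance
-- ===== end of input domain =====

-- B replaces A's per-number rescan of every shell by one counting pass plus one ordered dedup/filter pass (faster).

-- ===== PORT A =====
def BM_Table_of_Objects_NameMatching_IndexesIntersaction (indexes : List (List Int)) : List Int :=
  let idx := indexes.filter (fun shell => decide (shell.length ≠ 0))
  let intersaction := idx.foldl (fun acc shell =>
    shell.foldl (fun acc number =>
      if (idx.filter (fun shell1 => shell1.contains number)).length = idx.length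
      then acc ++ [number] else acc) acc) []
  PySem.List.dedup intersaction

-- ===== PORT B =====
def BM_Table_of_Objects_NameMatching_IndexesIntersaction_alt (indexes : List (List Int)) : List Int :=
  let shells := indexes.filter (fun shell => !shell.isEmpty)
  let n := shells.length
  let count : PySem.Dict Int Int := shells.foldl (fun d shell =>
    (PySem.Set.ofList shell).foldl (fun d number => d.insert number (d.getD number 0 + 1)) d)
    PySem.Dict.empty
  let flat := shells.flatMap (fun shell => shell)
  (PySem.List.dedup flat).filter (fun number => count.getD number 0 == (n : Int))

-- ===== PRECONDITION & SPEC =====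
def Spec_BM_Table_of_Objects_NameMatching_IndexesIntersaction (indexes : List (List Int)) (out : List Int) : Prop := out = BM_Table_of_Objects_NameMatching_IndexesIntersaction_alt indexes
instance (indexes : List (List Int)) (out : List Int) : Decidable (Spec_BM_Table_of_Objects_NameMatching_IndexesIntersaction indexes out) := by unfold Spec_BM_Table_of_Objects_NameMatching_IndexesIntersaction; infer_instance

-- ===== CLAIM (what is proved, stated in full; the proofs are below) =====
def Claim_equal_BM_Table_of_Objects_NameMatching_IndexesIntersaction : Prop := ∀ (indexes : List (List Int)), Dom_BM_Table_of_Objects_NameMatching_IndexesIntersaction indexes → Spec_BM_Table_of_Objects_NameMatching_IndexesIntersaction indexes (BM_Table_of_Objects_NameMatching_IndexesIntersaction indexes)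

-- ===== LEMMAS AND PROOFS =====

-- A's double loop builds the filtered concatenation of the shells
theorem pv_inner_fold (P : Int → Prop) [DecidablePred P] (shell acc : List Int) :
    shell.foldl (fun acc number => if P number then acc ++ [number] else acc) acc
      = acc ++ shell.filter (fun number => decide (P number)) := by
  induction shell generalizing acc with
  | nil => simp
  | cons x xs ih =>
    by_cases h : P x <;> simp [List.foldl, h, ih]

theorem pv_outer_fold (P : Int → Prop) [DecidablePred P] (shells : List (List Int)) (acc : List Int) :
    shells.foldl (fun acc shell =>
      shell.foldl (fun acc number => if P number then acc ++ [number] else acc) acc) acc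
      = acc ++ (shells.flatMap (fun s => s)).filter (fun number => decide (P number)) := by
  induction shells generalizing acc with
  | nil => simp
  | cons s ss ih => simp [List.foldl, pv_inner_fold P, ih]

-- Set.add then filtering by an element-only predicate, expressed on the filtered set
theorem pv_add_filter (p : Int → Bool) (s : List Int) (x : Int) :
    (PySem.Set.add s x).filter p = if p x then PySem.Set.add (s.filter p) x else s.filter p := by
  by_cases hm : x ∈ s
  · by_cases hp : p x = true
    · have hmf : x ∈ s.filter p := List.mem_filter.mpr ⟨hm, hp⟩
      simp [PySem.Set.add, hm, hmf, hp]
    · simp [PySem.Set.add, hm, hp]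
  · have hmf : x ∉ s.filter p := fun h => hm (List.mem_filter.mp h).1
    by_cases hp : p x = true <;>
      simp [PySem.Set.add, hm, hmf, hp, List.filter_append]

-- first-occurrence dedup commutes with filtering by an element-only predicate
theorem pv_foldl_add_filter (p : Int → Bool) (xs s : List Int) :
    (xs.filter p).foldl PySem.Set.add (s.filter p)
      = (xs.foldl PySem.Set.add s).filter p := by
  induction xs generalizing s with
  | nil => simp
  | cons x xs ih =>
    by_cases hp : p x = true
    · have h1 : PySem.Set.add (s.filter p) x = (PySem.Set.add s x).filter p := by
        rw [pv_add_filter, if_pos hp]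
      simp only [List.filter_cons, hp, if_pos, List.foldl_cons, h1, ih]
    · have h1 : (PySem.Set.add s x).filter p = s.filter p := by
        rw [pv_add_filter, if_neg hp]
      have hp' : p x = false := by simpa using hp
      simp only [List.filter_cons, hp', Bool.false_eq_true, if_false]
      rw [← h1, ih, List.foldl_cons]

theorem pv_dedup_filter (p : Int → Bool) (xs : List Int) :
    PySem.List.dedup (xs.filter p) = (PySem.List.dedup xs).filter p := by
  rw [PySem.List.dedup_eq_ofList, PySem.List.dedup_eq_ofList,
      PySem.Set.ofList_eq_foldl, PySem.Set.ofList_eq_foldl]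
  simpa using pv_foldl_add_filter p xs []

-- the counting dict records, per number, how many shells contain it
theorem pv_count_set (s : List Int) (x : Int) :
    (PySem.Set.ofList s).count x = (if s.contains x then 1 else 0) := by
  by_cases h : s.contains x = true
  · have hxs : x ∈ s := by simpa [List.contains_iff_mem] using h
    have hm : x ∈ PySem.Set.ofList s := (PySem.Set.mem_ofList s x).mpr hxs
    simp [hxs, List.count_eq_one_of_mem (PySem.Set.nodup_ofList s) hm]
  · have hxs : x ∉ s := by simpa [List.contains_iff_mem] using h
    have hm : x ∉ PySem.Set.ofList s := fun hc => hxs ((PySem.Set.mem_ofList s x).mp hc)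
    simp [hxs, List.count_eq_zero_of_not_mem hm]

theorem pv_count_fold (shells : List (List Int)) (d : PySem.Dict Int Int) (x : Int) :
    (shells.foldl (fun d shell =>
        (PySem.Set.ofList shell).foldl (fun d number => d.insert number (d.getD number 0 + 1)) d)
        d).getD x 0
      = d.getD x 0 + (shells.countP (fun s => s.contains x) : Int) := by
  induction shells generalizing d with
  | nil => simp
  | cons s ss ih =>
    rw [List.foldl_cons, ih, PySem.Dict.getD_foldl_insert_add_one, pv_count_set]
    rw [List.countP_cons]
    by_cases h : s.contains x = true <;> simp [h] <;> ring

-- ===== VERDICT (by name: the statement is the Claim_ definition above) =====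
theorem BM_Table_of_Objects_NameMatching_IndexesIntersaction_spec : Claim_equal_BM_Table_of_Objects_NameMatching_IndexesIntersaction := by
  intro indexes _
  unfold Spec_BM_Table_of_Objects_NameMatching_IndexesIntersaction
  simp only [BM_Table_of_Objects_NameMatching_IndexesIntersaction,
    BM_Table_of_Objects_NameMatching_IndexesIntersaction_alt]
  have hfil : indexes.filter (fun shell => decide (shell.length ≠ 0))
      = indexes.filter (fun shell => !shell.isEmpty) := by
    apply List.filter_congr
    intro s _
    cases s <;> simp
  rw [hfil, pv_outer_fold, List.nil_append, pv_dedup_filter]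
  apply List.filter_congr
  intro x _
  rw [pv_count_fold]
  simp [List.countP_eq_length_filter, beq_eq_decide]
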